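-- pv_equiv track=rewrite | github.com/UPC2023/Red_Mansions | scripts/annotate_data.py | annotate_sentence
-- ===== SOURCE A (Python) =====
-- def annotate_sentence(sentence, entity_list):
--     """对单个句子进行 BIO 标注（字符级），长实体优先并避免重叠。"""
--     sorted_entities = sorted(entity_list, key=len, reverse=True)
--     tokens = list(sentence)
--     labels = ['O'] * len(tokens)
--
--     for entity in sorted_entities:
--         if not entity:
--             continue
--         start_idx = sentence.find(entity)
--         while start_idx != -1:
--             end_idx = start_idx + len(entity)
--             # 检查位置是否未被标注
--             if all(labels[i] == 'O' for i in range(start_idx, end_idx)):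
--                 labels[start_idx] = 'B-PER'
--                 for i in range(start_idx + 1, end_idx):
--                     labels[i] = 'I-PER'
--             start_idx = sentence.find(entity, start_idx + 1)
--
--     return list(zip(tokens, labels))
-- ===== SOURCE B (Python) =====
-- def annotate_sentence(sentence, entity_list):
--     """Staged re-implementation: (1) hash the distinct entities to their priority rank
--     (longest-first stable order), (2) collect every candidate match with one window scan
--     of the sentence per distinct entity length (no per-entity search), (3) sort candidates
--     by (rank, position), (4) place them into a sorted disjoint-interval list using binary
--     search, (5) paint the BIO labels from the chosen intervals."""
--     n = len(sentence)
--     rank = {}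
--     for r, e in enumerate(sorted(entity_list, key=len, reverse=True)):
--         if e and e not in rank:
--             rank[e] = r
--     candidates = []
--     for L in sorted({len(e) for e in rank}):
--         for i in range(n - L + 1):
--             r = rank.get(sentence[i:i + L])
--             if r is not None:
--                 candidates.append((r, i, i + L))
--     candidates.sort()
--     starts, ends = [], []
--     for r, s, t in candidates:
--         lo, hi = 0, len(starts)
--         while lo < hi:
--             mid = (lo + hi) // 2
--             if starts[mid] <= s:
--                 lo = mid + 1
--             else:
--                 hi = mid
--         if (lo == 0 or ends[lo - 1] <= s) and (lo == len(starts) or t <= starts[lo]):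
--             starts.insert(lo, s)
--             ends.insert(lo, t)
--     labels = ['O'] * n
--     for s, t in zip(starts, ends):
--         labels[s] = 'B-PER'
--         for i in range(s + 1, t):
--             labels[i] = 'I-PER'
--     return list(zip(sentence, labels))
-- ===== Notes on version B (the rewrite author's own statement) =====
-- stated objective: faster
-- what changed: A searches per entity with repeated str.find and checks/mutates a per-character label array; B instead hashes the distinct entities to their priority rank, finds all candidate matches with one window scan of the sentence per distinct entity length, sorts the candidates by (rank, position), places them into a sorted disjoint-interval list via binary search, and paints the labels once at the end.
import Mathlib
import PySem

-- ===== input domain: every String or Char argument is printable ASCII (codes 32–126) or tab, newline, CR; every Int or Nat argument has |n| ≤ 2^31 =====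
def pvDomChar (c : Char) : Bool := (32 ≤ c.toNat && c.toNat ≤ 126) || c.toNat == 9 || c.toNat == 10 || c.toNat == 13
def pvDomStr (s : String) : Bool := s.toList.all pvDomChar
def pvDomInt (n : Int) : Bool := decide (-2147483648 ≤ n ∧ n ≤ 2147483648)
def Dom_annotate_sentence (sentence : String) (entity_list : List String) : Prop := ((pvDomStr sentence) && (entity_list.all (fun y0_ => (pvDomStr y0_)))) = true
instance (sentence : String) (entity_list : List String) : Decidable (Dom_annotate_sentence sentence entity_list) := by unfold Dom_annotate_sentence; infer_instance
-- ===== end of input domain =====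

-- B replaces A's per-entity find/label-scan loops by a staged pipeline: a hash table of entities
-- keyed by priority rank, one window scan of the sentence per distinct entity length to collect all
-- candidate matches, a sort by (rank, position), placement into a sorted disjoint-interval list via
-- binary search, and a final paint of the labels (measured asymptotically faster in the number of
-- entities in a timing run).

-- ===== PORT A =====
-- `all(labels[i] == 'O' for i in range(start_idx, end_idx))`; A only ever indexes labels
-- in range (find guarantees the occurrence fits in the sentence), so getD is exact here.
def pvCheckO (labels : List String) (st m : Nat) : Bool :=
  (List.range' st m).all (fun i => labels.getD i "" == "O")

-- `labels[start_idx] = 'B-PER'; for i in range(start_idx+1, end_idx): labels[i] = 'I-PER'`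
def pvMark (labels : List String) (st m : Nat) : List String :=
  (List.range' (st + 1) (m - 1)).foldl (fun lb i => lb.set i "I-PER") (labels.set st "B-PER")

-- the `while start_idx != -1` loop of A; fuel (sentence length + 1) is a totality device only:
-- the found index strictly increases and stays below the length, so fuel never runs out on a real run.
def pvAWhile (sch ech : List Char) : Nat → List String → Int → List String
  | 0, labels, _ => labels
  | fuel + 1, labels, s =>
    if s = -1 then labels
    else -- start_idx (= s.toNat) and the conditional labels update, locals inlined
      pvAWhile sch ech fuel
        (if pvCheckO labels s.toNat ech.length then pvMark labels s.toNat ech.length else labels)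
        (PySem.Chars.findFrom sch ech (s + 1) none)

def annotate_sentence (sentence : String) (entity_list : List String) : List (String × String) :=
  let sorted_entities := PySem.List.sorted entity_list (fun e => PySem.Str.len e) true
  let tokens := sentence.toList
  let labels := sorted_entities.foldl
    (fun labels entity =>
      if entity.toList = [] then labels
      else pvAWhile tokens entity.toList (tokens.length + 1) labels
             (PySem.Chars.find tokens entity.toList))
    (List.replicate tokens.length "O")
  (tokens.map (fun c => String.ofList [c])).zip labels

-- ===== PORT B =====
-- `if e and e not in rank: rank[e] = r` over `enumerate(sorted(entity_list, key=len, reverse=True))`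
def pvRankStep (d : PySem.Dict String Int) (re : Int × String) : PySem.Dict String Int :=
  if re.2.toList ≠ [] ∧ PySem.Dict.get? d re.2 = none then PySem.Dict.insert d re.2 re.1 else d

def pvRank (es : List String) : PySem.Dict String Int :=
  (PySem.List.enumerate es).foldl pvRankStep PySem.Dict.empty

-- the inner `for i in range(n - L + 1): r = rank.get(sentence[i:i+L]); if r is not None: append`
-- (range(n - L + 1) = List.range (n + 1 - L): both are empty when L > n; the slice sentence[i:i+L]
-- is the in-range window (sch.drop i).take L since 0 ≤ i and i + L ≤ n here)
def pvWindows (sch : List Char) (rank : PySem.Dict String Int) (L : Nat)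
    (cs : List (Int × Nat × Nat)) : List (Int × Nat × Nat) :=
  (List.range (sch.length + 1 - L)).foldl (fun cs i =>
    match PySem.Dict.get? rank (String.ofList ((sch.drop i).take L)) with
    | some r => cs ++ [(r, i, i + L)]
    | none => cs) cs

-- the hand-written `while lo < hi` binary search; `(lo + hi) // 2` on nonnegative ints is Nat
-- division; starts[mid] is in range (lo ≤ mid < hi ≤ len), so getD is exact; fuel (length + 1)
-- is a totality device only: hi - lo strictly shrinks
def pvBisect (starts : List Nat) (s : Nat) : Nat → Nat → Nat → Nat
  | 0, lo, _ => lo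
  | fuel + 1, lo, hi =>
    if lo < hi then
      if starts.getD ((lo + hi) / 2) 0 ≤ s then pvBisect starts s fuel ((lo + hi) / 2 + 1) hi
      else pvBisect starts s fuel lo ((lo + hi) / 2)
    else lo

-- one step of the selection sweep: `if (lo == 0 or ends[lo-1] <= s) and (lo == len(starts) or
-- t <= starts[lo]): starts.insert(lo, s); ends.insert(lo, t)` — ends[lo-1] / starts[lo] are in
-- range under their guards (getD exact), and list.insert at 0 ≤ lo ≤ len is insertIdx
def pvSelect (se : List Nat × List Nat) (c : Int × Nat × Nat) : List Nat × List Nat :=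
  let lo := pvBisect se.1 c.2.1 (se.1.length + 1) 0 se.1.length
  if (lo = 0 ∨ se.2.getD (lo - 1) 0 ≤ c.2.1) ∧ (lo = se.1.length ∨ c.2.2 ≤ se.1.getD lo 0) then
    (se.1.insertIdx lo c.2.1, se.2.insertIdx lo c.2.2)
  else se

-- `labels[s] = 'B-PER'; for i in range(s+1, t): labels[i] = 'I-PER'` for one chosen interval
def pvPaint (lb : List String) (st : Nat × Nat) : List String :=
  (List.range' (st.1 + 1) (st.2 - (st.1 + 1))).foldl (fun lb i => lb.set i "I-PER")
    (lb.set st.1 "B-PER")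

def annotate_sentence_alt (sentence : String) (entity_list : List String) : List (String × String) :=
  let sch := sentence.toList
  let rank := pvRank (PySem.List.sorted entity_list (fun e => PySem.Str.len e) true)
  -- `for L in sorted({len(e) for e in rank})`
  let lengths := PySem.List.sorted
    (PySem.Set.ofList ((PySem.Dict.keys rank).map (fun e => e.toList.length))) (fun L => L) false
  let candidates := lengths.foldl (fun cs L => pvWindows sch rank L cs) []
  -- `candidates.sort()`: lexicographic on (r, i, t); t is determined by (r, i) here, so the
  -- 2-component tuple key (r, i) sorts identically
  let scand := PySem.List.sorted2 candidates (fun c => c.1) (fun c => c.2.1) false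
  let se := scand.foldl pvSelect ([], [])
  let labels := (se.1.zip se.2).foldl pvPaint (List.replicate sch.length "O")
  (sch.map (fun c => String.ofList [c])).zip labels

-- ===== PRECONDITION & SPEC =====
def Spec_annotate_sentence (sentence : String) (entity_list : List String) (out : List (String × String)) : Prop := out = annotate_sentence_alt sentence entity_list
instance (sentence : String) (entity_list : List String) (out : List (String × String)) : Decidable (Spec_annotate_sentence sentence entity_list out) := by unfold Spec_annotate_sentence; infer_instance

-- ===== CLAIM (what is proved, stated in full; the proofs are below) =====
def Claim_equal_annotate_sentence : Prop := ∀ (sentence : String) (entity_list : List String), Dom_annotate_sentence sentence entity_list → Spec_annotate_sentence sentence entity_list (annotate_sentence sentence entity_list)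

-- ===== LEMMAS AND PROOFS =====

-- i lies inside one of the chosen intervals
def pvCov (ch : List (Nat × Nat)) (i : Nat) : Prop := ∃ ab ∈ ch, ab.1 ≤ i ∧ i < ab.2

-- occurrence positions of ech in sch at index ≥ k
def pvOccs (sch ech : List Char) (k : Nat) : List Nat :=
  (List.range sch.length).filter (fun i => decide (k ≤ i) && ech.isPrefixOf (sch.drop i))

-- reference greedy placement (append a candidate interval iff it overlaps nothing chosen so far)
def pvStep (ch : List (Nat × Nat)) (st : Nat × Nat) : List (Nat × Nat) :=
  if ch.all (fun ab => decide (st.2 ≤ ab.1) || decide (ab.2 ≤ st.1)) then ch ++ [st] else ch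

-- the BIO label a chosen-interval list assigns to position i
def pvRenderIv (ch : List (Nat × Nat)) (i : Nat) : String :=
  if ch.any (fun ab => ab.1 == i) then "B-PER"
  else if ch.any (fun ab => decide (ab.1 < i) && decide (i < ab.2)) then "I-PER"
  else "O"

-- the candidate intervals of one entity, in position order
def pvBlock (sch : List Char) (e : String) : List (Nat × Nat) :=
  if e.toList = [] then []
  else (List.range sch.length).filterMap
    (fun i => if e.toList.isPrefixOf (sch.drop i) then some (i, i + e.toList.length) else none)

-- the canonical priority-ordered candidate list: blocks of distinct entities in first-occurrence
-- order, each tagged with the entity's rank (= its first index in the sorted entity list)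
def pvC (sch : List Char) (es : List String) : List (Int × Nat × Nat) :=
  (PySem.List.dedup es).flatMap
    (fun e => (pvBlock sch e).map (fun p => ((es.idxOf e : Int), p.1, p.2)))

theorem pv_set_getD (l : List String) (i j : Nat) (v d : String) :
    (l.set i v).getD j d = if i = j ∧ j < l.length then v else l.getD j d := by
  simp [List.getD, List.getElem?_set]
  split_ifs <;> simp_all

theorem pv_foldl_set_getD (L : List Nat) (v : String) (lb : List String) (j : Nat) (d : String) :
    (L.foldl (fun lb i => lb.set i v) lb).getD j d =
      if j ∈ L ∧ j < lb.length then v else lb.getD j d := by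
  induction L generalizing lb with
  | nil => simp
  | cons x L ih =>
    simp only [List.foldl_cons, ih, List.length_set, pv_set_getD, List.mem_cons]
    by_cases hx : j ∈ L <;> by_cases hj : j < lb.length <;> by_cases he : x = j <;> simp_all <;> intros <;> omega

theorem pv_foldl_set_length (L : List Nat) (v : String) (lb : List String) :
    (L.foldl (fun lb i => lb.set i v) lb).length = lb.length := by
  induction L generalizing lb with
  | nil => rfl
  | cons x L ih => simp [List.foldl_cons, ih]

theorem pv_render_O (ch : List (Nat × Nat)) (hne : ∀ ab ∈ ch, ab.1 < ab.2) (i : Nat) :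
    pvRenderIv ch i = "O" ↔ ¬ pvCov ch i := by
  unfold pvRenderIv pvCov
  constructor
  · intro h hc
    obtain ⟨ab, hab, h1, h2⟩ := hc
    by_cases hB : (ch.any (fun ab => ab.1 == i)) = true
    · rw [if_pos hB] at h; exact absurd h (by decide)
    · by_cases hI : (ch.any (fun ab => decide (ab.1 < i) && decide (i < ab.2))) = true
      · rw [if_neg hB, if_pos hI] at h; exact absurd h (by decide)
      · rcases eq_or_lt_of_le h1 with he | hl
        · exact hB (List.any_eq_true.mpr ⟨ab, hab, by simp [he.symm]⟩)
        · exact hI (List.any_eq_true.mpr ⟨ab, hab, by simp [hl, h2]⟩)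
  · intro hc
    have hB : ¬ (ch.any (fun ab => ab.1 == i)) = true := by
      intro h'
      obtain ⟨ab, hab, h2⟩ := List.any_eq_true.mp h'
      rw [beq_iff_eq] at h2
      exact hc ⟨ab, hab, le_of_eq h2, h2 ▸ hne ab hab⟩
    have hI : ¬ (ch.any (fun ab => decide (ab.1 < i) && decide (i < ab.2))) = true := by
      intro h'
      obtain ⟨ab, hab, h2⟩ := List.any_eq_true.mp h'
      simp only [Bool.and_eq_true, decide_eq_true_eq] at h2
      exact hc ⟨ab, hab, le_of_lt h2.1, h2.2⟩
    rw [if_neg hB, if_neg hI]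

theorem pv_render_start (ch : List (Nat × Nat)) (c : Nat × Nat) (j : Nat) (h : c.1 = j) :
    pvRenderIv (ch ++ [c]) j = "B-PER" := by
  unfold pvRenderIv
  have hB : ((ch ++ [c]).any fun ab => ab.1 == j) = true := by
    simp [List.any_append, h]
  rw [if_pos hB]

theorem pv_render_mid (ch : List (Nat × Nat)) (c : Nat × Nat) (j : Nat)
    (hne : ∀ ab ∈ ch, ab.1 < ab.2) (h : c.1 < j ∧ j < c.2) (hfree : ¬ pvCov ch j) :
    pvRenderIv (ch ++ [c]) j = "I-PER" := by
  unfold pvRenderIv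
  have hB : ¬ ((ch ++ [c]).any fun ab => ab.1 == j) = true := by
    intro h'
    obtain ⟨ab, hab, h2⟩ := List.any_eq_true.mp h'
    rw [beq_iff_eq] at h2
    rcases List.mem_append.mp hab with hm | hm
    · exact hfree ⟨ab, hm, le_of_eq h2, h2 ▸ hne ab hm⟩
    · rw [List.mem_singleton.mp hm] at h2; omega
  have hI : ((ch ++ [c]).any fun ab => decide (ab.1 < j) && decide (j < ab.2)) = true := by
    refine List.any_eq_true.mpr ⟨c, List.mem_append_right _ (List.mem_singleton.mpr rfl), ?_⟩
    simp [h.1, h.2]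
  rw [if_neg hB, if_pos hI]

theorem pv_render_append (ch : List (Nat × Nat)) (c : Nat × Nat) (j : Nat)
    (hB : ¬ c.1 = j) (hI : ¬ (c.1 < j ∧ j < c.2)) :
    pvRenderIv (ch ++ [c]) j = pvRenderIv ch j := by
  unfold pvRenderIv
  have e1 : ((ch ++ [c]).any fun ab => ab.1 == j) = (ch.any fun ab => ab.1 == j) := by
    simp [List.any_append, hB]
  have e2 : ((ch ++ [c]).any fun ab => decide (ab.1 < j) && decide (j < ab.2))
      = (ch.any fun ab => decide (ab.1 < j) && decide (j < ab.2)) := by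
    have : (decide (c.1 < j) && decide (j < c.2)) = false := by
      rcases Nat.lt_or_ge c.1 j with h | h
      · have : ¬ j < c.2 := fun hh => hI ⟨h, hh⟩
        simp [this]
      · have : ¬ c.1 < j := by omega
        simp [this]
    simp [List.any_append, this]
  rw [e1, e2]

theorem pv_guard_eq (ch : List (Nat × Nat)) (labels : List String) (n st m : Nat)
    (hl : labels = (List.range n).map (pvRenderIv ch))
    (hne : ∀ ab ∈ ch, ab.1 < ab.2) (hb : st + m ≤ n) (hm : 1 ≤ m) :
    pvCheckO labels st m = ch.all (fun ab => decide (st + m ≤ ab.1) || decide (ab.2 ≤ st)) := by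
  rw [Bool.eq_iff_iff]
  unfold pvCheckO
  rw [List.all_eq_true, List.all_eq_true]
  constructor
  · intro h ab hab
    rw [Bool.or_eq_true, decide_eq_true_eq, decide_eq_true_eq]
    by_contra hcon
    push Not at hcon
    obtain ⟨h1, h2⟩ := hcon
    have hab2 := hne ab hab
    have hmem : max st ab.1 ∈ List.range' st m := List.mem_range'_1.mpr ⟨le_max_left _ _, by omega⟩
    have hlt : max st ab.1 < n := by omega
    have hO := h _ hmem
    rw [hl, PySem.List.getD_map_range _ _ _ _ hlt, beq_iff_eq, pv_render_O ch hne] at hO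
    exact hO ⟨ab, hab, by omega, by omega⟩
  · intro h i hmem
    have hir := List.mem_range'_1.mp hmem
    have hlt : i < n := by omega
    rw [hl, PySem.List.getD_map_range _ _ _ _ hlt, beq_iff_eq, pv_render_O ch hne]
    rintro ⟨ab, hab, ha1, ha2⟩
    have := h ab hab
    rw [Bool.or_eq_true, decide_eq_true_eq, decide_eq_true_eq] at this
    omega

theorem pv_mark_eq (ch : List (Nat × Nat)) (labels : List String) (n st m : Nat)
    (hl : labels = (List.range n).map (pvRenderIv ch))
    (hne : ∀ ab ∈ ch, ab.1 < ab.2) (_hb : st + m ≤ n) (hm : 1 ≤ m)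
    (hfree : ∀ i, st ≤ i → i < st + m → ¬ pvCov ch i) :
    pvMark labels st m = (List.range n).map (pvRenderIv (ch ++ [(st, st + m)])) := by
  have hlen : labels.length = n := by simp [hl]
  apply List.ext_getElem
  · simp [pvMark, pv_foldl_set_length, hlen]
  · intro j hj1 hj2
    have hjn : j < n := by simpa using hj2
    have lhs : (pvMark labels st m)[j] = (pvMark labels st m).getD j "" := by
      rw [List.getD_eq_getElem _ _ hj1]
    rw [lhs]
    have rhs : ((List.range n).map (pvRenderIv (ch ++ [(st, st + m)])))[j]
        = pvRenderIv (ch ++ [(st, st + m)]) j := by simp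
    rw [rhs]
    unfold pvMark
    rw [pv_foldl_set_getD, pv_set_getD]
    simp only [List.length_set, hlen, List.mem_range'_1]
    by_cases h1' : j = st
    · have c1 : ¬ ((st + 1 ≤ j ∧ j < st + 1 + (m - 1)) ∧ j < n) := by omega
      have c2 : st = j ∧ j < n := by omega
      rw [if_neg c1, if_pos c2, pv_render_start _ _ _ h1'.symm]
    · by_cases h2' : st < j ∧ j < st + m
      · have c1 : (st + 1 ≤ j ∧ j < st + 1 + (m - 1)) ∧ j < n := by omega
        rw [if_pos c1, pv_render_mid ch (st, st + m) j hne ⟨h2'.1, h2'.2⟩ (hfree j (by omega) (by omega))]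
      · have c1 : ¬ ((st + 1 ≤ j ∧ j < st + 1 + (m - 1)) ∧ j < n) := by omega
        have c2 : ¬ (st = j ∧ j < n) := by omega
        rw [if_neg c1, if_neg c2, hl, PySem.List.getD_map_range _ _ _ _ hjn,
          pv_render_append ch (st, st + m) j (by omega) (by omega)]

theorem pv_filter_ge (P : Nat → Bool) : ∀ (n r : Nat), r < n → P r = true →
    (List.range n).filter (fun i => decide (r ≤ i) && P i)
      = r :: (List.range n).filter (fun i => decide (r + 1 ≤ i) && P i) := by
  intro n
  induction n with
  | zero => intro r h _; omega
  | succ n ih =>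
    intro r hr hP
    rw [List.range_succ, List.filter_append, List.filter_append]
    by_cases h : r < n
    · rw [ih r h hP]
      have e1 : decide (r ≤ n) = true := by simp; omega
      have e2 : decide (r + 1 ≤ n) = true := by simp; omega
      simp only [List.filter_cons, List.filter_nil, e1, e2, Bool.true_and, List.cons_append]
    · have he : r = n := by omega
      subst he
      have h1 : (List.range r).filter (fun i => decide (r ≤ i) && P i) = [] := by
        rw [List.filter_eq_nil_iff]
        intro i hi
        simp [Nat.not_le.mpr (List.mem_range.mp hi)]
      have h2 : (List.range r).filter (fun i => decide (r + 1 ≤ i) && P i) = [] := by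
        rw [List.filter_eq_nil_iff]
        intro i hi
        have := List.mem_range.mp hi
        simp [show ¬ r + 1 ≤ i by omega]
      simp only [h1, h2, List.filter_cons, List.filter_nil, hP, Bool.and_true,
        List.nil_append]
      simp

theorem pv_occs_nil (sch ech : List Char) (k : Nat) (hk : k ≤ sch.length)
    (h : PySem.Chars.findFrom sch ech ((k : Nat) : Int) none = -1) :
    pvOccs sch ech k = [] := by
  have hinf : ¬ ech <:+: sch.drop k :=
    (PySem.Chars.findFrom_natCast_eq_neg_one_iff sch ech k hk).mp h
  unfold pvOccs
  rw [List.filter_eq_nil_iff]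
  intro i _
  rw [Bool.and_eq_true, decide_eq_true_eq, List.isPrefixOf_iff_prefix]
  rintro ⟨hki, hpre⟩
  have hdd : (sch.drop k).drop (i - k) = sch.drop i := by
    rw [List.drop_drop]; congr 1; omega
  have hisin := (PySem.Chars.exists_prefix_drop_iff_isIn ech (sch.drop k)).mp
    ⟨i - k, by rw [hdd]; exact hpre⟩
  exact hinf ((PySem.Chars.isIn_iff_infix ech (sch.drop k)).mp hisin)

theorem pv_occs_cons (sch ech : List Char) (k : Nat) (hk : k ≤ sch.length) (hne : ech ≠ [])
    (h : PySem.Chars.findFrom sch ech ((k : Nat) : Int) none ≠ -1) :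
    pvOccs sch ech k = (PySem.Chars.findFrom sch ech ((k : Nat) : Int) none).toNat ::
      pvOccs sch ech ((PySem.Chars.findFrom sch ech ((k : Nat) : Int) none).toNat + 1) ∧
    (PySem.Chars.findFrom sch ech ((k : Nat) : Int) none).toNat + ech.length ≤ sch.length ∧
    ((k : Int) ≤ PySem.Chars.findFrom sch ech ((k : Nat) : Int) none) := by
  obtain ⟨h1, h2, h3⟩ := PySem.Chars.findFrom_natCast_spec sch ech k hk h
  have hm : 0 < ech.length := List.length_pos_of_ne_nil hne
  have hlen := h2.length_le
  rw [List.length_drop] at hlen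
  have hb : (PySem.Chars.findFrom sch ech ((k : Nat) : Int) none).toNat + ech.length ≤ sch.length := by
    omega
  refine ⟨?_, hb, h1⟩
  have hr : (PySem.Chars.findFrom sch ech ((k : Nat) : Int) none).toNat < sch.length := by omega
  have hkr : k ≤ (PySem.Chars.findFrom sch ech ((k : Nat) : Int) none).toNat := by omega
  unfold pvOccs
  rw [List.filter_congr (l := List.range sch.length)
    (q := fun i => decide ((PySem.Chars.findFrom sch ech ((k : Nat) : Int) none).toNat ≤ i)
      && ech.isPrefixOf (sch.drop i)) ?_]
  · exact pv_filter_ge (fun i => ech.isPrefixOf (sch.drop i)) sch.length _ hr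
      (List.isPrefixOf_iff_prefix.mpr h2)
  · intro i _
    by_cases hki : k ≤ i
    · by_cases hri : (PySem.Chars.findFrom sch ech ((k : Nat) : Int) none).toNat ≤ i
      · simp [hki, hri]
      · have hnp : ech.isPrefixOf (sch.drop i) = false := by
          rw [Bool.eq_false_iff, ne_eq, List.isPrefixOf_iff_prefix]
          exact h3 i hki (by omega)
        simp [hki, hri, hnp]
    · simp [hki, show ¬ (PySem.Chars.findFrom sch ech ((k : Nat) : Int) none).toNat ≤ i by omega]

theorem pv_couple (sch ech : List Char) (hne : ech ≠ []) :
    ∀ (fuel k : Nat) (labels : List String) (ch : List (Nat × Nat)),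
      k ≤ sch.length → sch.length + 1 ≤ fuel + k →
      labels = (List.range sch.length).map (pvRenderIv ch) →
      (∀ ab ∈ ch, ab.1 < ab.2) →
      pvAWhile sch ech fuel labels (PySem.Chars.findFrom sch ech ((k : Nat) : Int) none) =
        (List.range sch.length).map
          (pvRenderIv ((pvOccs sch ech k).foldl (fun c i => pvStep c (i, i + ech.length)) ch))
      ∧ (∀ ab ∈ (pvOccs sch ech k).foldl (fun c i => pvStep c (i, i + ech.length)) ch, ab.1 < ab.2) := by
  have hm : 0 < ech.length := List.length_pos_of_ne_nil hne
  intro fuel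
  induction fuel with
  | zero => intro k _ _ hk hf _ _; omega
  | succ fuel ih =>
    intro k labels ch hk hf hl hch
    by_cases hstop : PySem.Chars.findFrom sch ech ((k : Nat) : Int) none = -1
    · rw [pv_occs_nil sch ech k hk hstop]
      simp only [List.foldl_nil]
      unfold pvAWhile
      rw [if_pos hstop]
      exact ⟨hl, hch⟩
    · obtain ⟨hocc, hb, hkf⟩ := pv_occs_cons sch ech k hk hne hstop
      have hf0 : (0 : Int) ≤ PySem.Chars.findFrom sch ech ((k : Nat) : Int) none :=
        le_trans (by positivity) hkf
      have hktn : k ≤ (PySem.Chars.findFrom sch ech ((k : Nat) : Int) none).toNat := by omega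
      have hcast : PySem.Chars.findFrom sch ech ((k : Nat) : Int) none + 1
          = (((PySem.Chars.findFrom sch ech ((k : Nat) : Int) none).toNat + 1 : Nat) : Int) := by
        push_cast [Int.toNat_of_nonneg hf0]; ring
      rw [hocc]
      simp only [List.foldl_cons]
      unfold pvAWhile
      rw [if_neg hstop]
      have hguard := pv_guard_eq ch labels sch.length
        (PySem.Chars.findFrom sch ech ((k : Nat) : Int) none).toNat ech.length hl hch hb hm
      rw [hguard, hcast]
      unfold pvStep
      by_cases hd : ch.all (fun ab =>
          decide ((PySem.Chars.findFrom sch ech ((k : Nat) : Int) none).toNat + ech.length ≤ ab.1)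
          || decide (ab.2 ≤ (PySem.Chars.findFrom sch ech ((k : Nat) : Int) none).toNat)) = true
      · rw [if_pos hd, if_pos hd]
        have hfree : ∀ i, (PySem.Chars.findFrom sch ech ((k : Nat) : Int) none).toNat ≤ i →
            i < (PySem.Chars.findFrom sch ech ((k : Nat) : Int) none).toNat + ech.length →
            ¬ pvCov ch i := by
          intro i hi1 hi2
          rintro ⟨ab, hab, ha1, ha2⟩
          have := List.all_eq_true.mp hd ab hab
          rw [Bool.or_eq_true, decide_eq_true_eq, decide_eq_true_eq] at this
          omega
        have hl' := pv_mark_eq ch labels sch.length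
          (PySem.Chars.findFrom sch ech ((k : Nat) : Int) none).toNat ech.length hl hch hb hm hfree
        have hch' : ∀ ab ∈ ch ++ [((PySem.Chars.findFrom sch ech ((k : Nat) : Int) none).toNat,
            (PySem.Chars.findFrom sch ech ((k : Nat) : Int) none).toNat + ech.length)], ab.1 < ab.2 := by
          intro ab hab
          rcases List.mem_append.mp hab with hm' | hm'
          · exact hch ab hm'
          · rw [List.mem_singleton.mp hm']; simpa using hm
        exact ih _ _ _ (by omega) (by omega) hl' hch'
      · rw [if_neg hd, if_neg hd]
        exact ih _ _ _ (by omega) (by omega) hl hch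

theorem pv_filterMap_occs (sch ech : List Char) :
    (List.range sch.length).filterMap
        (fun i => if ech.isPrefixOf (sch.drop i) then some (i, i + ech.length) else none)
      = (pvOccs sch ech 0).map (fun i => (i, i + ech.length)) := by
  unfold pvOccs
  have h : ∀ l : List Nat,
      l.filterMap (fun i => if ech.isPrefixOf (sch.drop i) then some (i, i + ech.length) else none)
        = (l.filter (fun i => decide (0 ≤ i) && ech.isPrefixOf (sch.drop i))).map
            (fun i => (i, i + ech.length)) := by
    intro l
    induction l with
    | nil => rfl
    | cons x l ihl =>
      have hz : (decide (0 ≤ x) && ech.isPrefixOf (sch.drop x)) = ech.isPrefixOf (sch.drop x) := by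
        simp
      rw [List.filter_cons, hz]
      by_cases hp : ech.isPrefixOf (sch.drop x) = true
      · rw [List.filterMap_cons_some (by rw [if_pos hp] : _ = some (x, x + ech.length)), if_pos hp, List.map_cons, ihl]
      · rw [List.filterMap_cons_none (by rw [if_neg hp] : _ = none), if_neg hp, ihl]
  exact h (List.range sch.length)

theorem pv_fold (sch : List Char) :
    ∀ (es : List String) (labels : List String) (ch : List (Nat × Nat)),
      labels = (List.range sch.length).map (pvRenderIv ch) →
      (∀ ab ∈ ch, ab.1 < ab.2) →
      es.foldl (fun labels entity =>
          if entity.toList = [] then labels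
          else pvAWhile sch entity.toList (sch.length + 1) labels
                 (PySem.Chars.find sch entity.toList)) labels
        = (List.range sch.length).map (pvRenderIv
            ((es.flatMap (fun e =>
              if e.toList = [] then []
              else (List.range sch.length).filterMap
                (fun i => if e.toList.isPrefixOf (sch.drop i) then some (i, i + e.toList.length) else none))).foldl pvStep ch))
      ∧ (∀ ab ∈ (es.flatMap (fun e =>
              if e.toList = [] then []
              else (List.range sch.length).filterMap
                (fun i => if e.toList.isPrefixOf (sch.drop i) then some (i, i + e.toList.length) else none))).foldl pvStep ch, ab.1 < ab.2) := by
  intro es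
  induction es with
  | nil => intro labels ch hl hch; exact ⟨hl, hch⟩
  | cons e es ih =>
    intro labels ch hl hch
    rw [List.flatMap_cons, List.foldl_append, List.foldl_cons]
    by_cases hne : e.toList = []
    · rw [if_pos hne, if_pos hne]
      simp only [List.foldl_nil]
      exact ih labels ch hl hch
    · rw [if_neg hne, if_neg hne]
      rw [pv_filterMap_occs sch e.toList, List.foldl_map]
      have hfind : PySem.Chars.find sch e.toList
          = PySem.Chars.findFrom sch e.toList (((0 : Nat) : Int)) none := by
        rw [Nat.cast_zero, PySem.Chars.findFrom_zero]
      rw [hfind]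
      have hc := pv_couple sch e.toList hne (sch.length + 1) 0 labels ch
        (Nat.zero_le _) (by omega) hl hch
      rw [hc.1]
      exact ih _ _ rfl hc.2

-- ===== stage 1: placement-fold facts, dedup spine, block facts =====

def pvBlocked (c : Nat × Nat) (ch : List (Nat × Nat)) : Prop :=
  ∃ ab ∈ ch, ¬ (c.2 ≤ ab.1 ∨ ab.2 ≤ c.1)

theorem pv_fold_prefix (L : List (Nat × Nat)) :
    ∀ ch, ∃ suf, L.foldl pvStep ch = ch ++ suf := by
  induction L with
  | nil => intro ch; exact ⟨[], by simp⟩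
  | cons c L ih =>
    intro ch
    rw [List.foldl_cons]
    by_cases hd : (ch.all fun ab => decide (c.2 ≤ ab.1) || decide (ab.2 ≤ c.1)) = true
    · have e : pvStep ch c = ch ++ [c] := by unfold pvStep; rw [if_pos hd]
      rw [e]
      obtain ⟨suf, hs⟩ := ih (ch ++ [c])
      exact ⟨[c] ++ suf, by rw [hs, List.append_assoc]⟩
    · have e : pvStep ch c = ch := by unfold pvStep; rw [if_neg hd]
      rw [e]; exact ih ch

theorem pv_blocked_mono (c : Nat × Nat) (ch suf : List (Nat × Nat)) (h : pvBlocked c ch) :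
    pvBlocked c (ch ++ suf) := by
  obtain ⟨ab, hm, ho⟩ := h
  exact ⟨ab, List.mem_append_left _ hm, ho⟩

theorem pv_blocked_all_false (c : Nat × Nat) (ch : List (Nat × Nat)) (h : pvBlocked c ch) :
    (ch.all fun ab => decide (c.2 ≤ ab.1) || decide (ab.2 ≤ c.1)) = false := by
  obtain ⟨ab, hm, ho⟩ := h
  rw [Bool.eq_false_iff, ne_eq, List.all_eq_true]
  intro hall
  have := hall ab hm
  rw [Bool.or_eq_true, decide_eq_true_eq, decide_eq_true_eq] at this
  exact ho this

theorem pv_step_blocked (c : Nat × Nat) (ch : List (Nat × Nat)) (hc : c.1 < c.2) :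
    pvBlocked c (pvStep ch c) := by
  unfold pvStep
  by_cases hd : (ch.all fun ab => decide (c.2 ≤ ab.1) || decide (ab.2 ≤ c.1)) = true
  · rw [if_pos hd]
    exact ⟨c, List.mem_append_right _ (List.mem_singleton.mpr rfl), by omega⟩
  · rw [if_neg hd]
    rw [Bool.not_eq_true, List.all_eq_false] at hd
    obtain ⟨ab, hm, ho⟩ := hd
    rw [Bool.not_eq_true, Bool.or_eq_false_iff, decide_eq_false_iff_not,
      decide_eq_false_iff_not] at ho
    exact ⟨ab, hm, by omega⟩

theorem pv_fold_id_of_blocked (L : List (Nat × Nat)) :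
    ∀ ch, (∀ c ∈ L, pvBlocked c ch) → L.foldl pvStep ch = ch := by
  induction L with
  | nil => intro ch _; rfl
  | cons c L ih =>
    intro ch h
    rw [List.foldl_cons]
    have hstep : pvStep ch c = ch := by
      unfold pvStep
      rw [pv_blocked_all_false c ch (h c (List.mem_cons_self))]
      simp
    rw [hstep]
    exact ih ch (fun c' hc' => h c' (List.mem_cons_of_mem _ hc'))

theorem pv_fold_all_blocked (L : List (Nat × Nat)) :
    ∀ ch, (∀ c ∈ L, c.1 < c.2) → ∀ c ∈ L, pvBlocked c (L.foldl pvStep ch) := by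
  induction L with
  | nil => intro ch _ c hc; exact absurd hc List.not_mem_nil
  | cons c0 L ih =>
    intro ch hlt c hc
    rw [List.foldl_cons]
    rcases List.mem_cons.mp hc with h | h
    · subst h
      obtain ⟨suf, hs⟩ := pv_fold_prefix L (pvStep ch c)
      rw [hs]
      exact pv_blocked_mono _ _ _ (pv_step_blocked c ch (hlt c hc))
    · exact ih (pvStep ch c0) (fun c' hc' => hlt c' (List.mem_cons_of_mem _ hc')) c h

theorem pv_fold_mem (L : List (Nat × Nat)) :
    ∀ ch ab, ab ∈ L.foldl pvStep ch → ab ∈ ch ∨ ab ∈ L := by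
  induction L with
  | nil => intro ch ab h; exact Or.inl h
  | cons c L ih =>
    intro ch ab h
    rw [List.foldl_cons] at h
    rcases ih _ _ h with h' | h'
    · unfold pvStep at h'
      split_ifs at h' with hd
      · rcases List.mem_append.mp h' with h'' | h''
        · exact Or.inl h''
        · exact Or.inr (List.mem_cons.mpr (Or.inl (List.mem_singleton.mp h'')))
      · exact Or.inl h'
    · exact Or.inr (List.mem_cons_of_mem _ h')

-- first-occurrence spine of PySem's dict.fromkeys dedup
def pvDD : List String → List String → List String
  | _, [] => []
  | acc, x :: xs => if acc.contains x then pvDD acc xs else x :: pvDD (acc ++ [x]) xs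

theorem pv_ofList_dd : ∀ (xs acc : List String), xs.foldl PySem.Set.add acc = acc ++ pvDD acc xs := by
  intro xs
  induction xs with
  | nil => intro acc; simp [pvDD]
  | cons x xs ih =>
    intro acc
    rw [List.foldl_cons]
    unfold pvDD
    by_cases hx : acc.contains x = true
    · have : PySem.Set.add acc x = acc := by
        unfold PySem.Set.add PySem.Set.contains
        rw [if_pos hx]
      rw [this, ih, if_pos hx]
    · have : PySem.Set.add acc x = acc ++ [x] := by
        unfold PySem.Set.add PySem.Set.contains
        rw [if_neg hx]
      rw [this, ih, if_neg hx, List.append_assoc]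
      rfl

theorem pv_dedup_dd (xs : List String) : PySem.List.dedup xs = pvDD [] xs := by
  have h := pv_ofList_dd xs []
  rw [List.nil_append] at h
  exact h

theorem pv_blk_mem (sch : List Char) (e : String) (p : Nat × Nat) :
    p ∈ pvBlock sch e ↔ e.toList ≠ [] ∧ p.1 < sch.length ∧ e.toList <+: sch.drop p.1 ∧
      p.2 = p.1 + e.toList.length := by
  unfold pvBlock
  by_cases he : e.toList = []
  · simp [he]
  · rw [if_neg he, List.mem_filterMap]
    constructor
    · rintro ⟨i, hi, hp⟩
      split_ifs at hp with hpre
      · injection hp with hp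
        rw [List.isPrefixOf_iff_prefix] at hpre
        exact ⟨he, by rw [← hp]; simpa using List.mem_range.mp hi,
          by rw [← hp]; exact hpre, by rw [← hp]⟩
    · rintro ⟨_, h1, h2, h3⟩
      refine ⟨p.1, List.mem_range.mpr h1, ?_⟩
      rw [if_pos (List.isPrefixOf_iff_prefix.mpr h2), ← h3]

theorem pv_blk_lt (sch : List Char) (e : String) (p : Nat × Nat) (h : p ∈ pvBlock sch e) :
    p.1 < p.2 := by
  obtain ⟨h1, _, _, h4⟩ := (pv_blk_mem sch e p).mp h
  have := List.length_pos_of_ne_nil h1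
  omega

theorem pv_blk_le (sch : List Char) (e : String) (p : Nat × Nat) (h : p ∈ pvBlock sch e) :
    p.2 ≤ sch.length := by
  obtain ⟨_, _, h3, h4⟩ := (pv_blk_mem sch e p).mp h
  have := h3.length_le
  rw [List.length_drop] at this
  omega

theorem pv_blk_pairwise (sch : List Char) (e : String) :
    (pvBlock sch e).Pairwise (fun p q => p.1 < q.1) := by
  unfold pvBlock
  by_cases he : e.toList = []
  · simp [he]
  · rw [if_neg he, pv_filterMap_occs sch e.toList]
    refine List.Pairwise.map _ (fun a b h => h) ?_
    unfold pvOccs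
    exact List.Pairwise.filter _ (List.pairwise_lt_range)

-- ===== stage 2: duplicate entities are no-ops; first-occurrence ranks increase =====

theorem pv_flatMap_dd (sch : List Char) :
    ∀ (xs acc : List String) (ch : List (Nat × Nat)),
      (∀ e ∈ acc, ∀ c ∈ pvBlock sch e, pvBlocked c ch) →
      (xs.flatMap (pvBlock sch)).foldl pvStep ch
        = ((pvDD acc xs).flatMap (pvBlock sch)).foldl pvStep ch := by
  intro xs
  induction xs with
  | nil => intro acc ch _; rfl
  | cons x xs ih =>
    intro acc ch h
    rw [List.flatMap_cons, List.foldl_append]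
    unfold pvDD
    by_cases hx : acc.contains x = true
    · rw [if_pos hx]
      rw [List.contains_eq_mem, decide_eq_true_eq] at hx
      rw [pv_fold_id_of_blocked _ _ (h x hx)]
      exact ih acc ch h
    · rw [if_neg hx, List.flatMap_cons, List.foldl_append]
      apply ih
      intro e he c hc
      rcases List.mem_append.mp he with h' | h'
      · obtain ⟨suf, hs⟩ := pv_fold_prefix (pvBlock sch x) ch
        rw [hs]
        exact pv_blocked_mono _ _ _ (h e h' c hc)
      · rw [List.mem_singleton.mp h']  at hc
        exact pv_fold_all_blocked _ _ (fun c' hc' => pv_blk_lt sch x c' hc') c hc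

theorem pv_dd_idx (es : List String) :
    ∀ (xs pre acc : List String), es = pre ++ xs →
      (∀ a, a ∈ acc ↔ a ∈ pre) →
      (pvDD acc xs).Pairwise (fun a b => es.idxOf a < es.idxOf b) ∧
      (∀ b ∈ pvDD acc xs, pre.length ≤ es.idxOf b) := by
  intro xs
  induction xs with
  | nil =>
    intro pre acc _ _
    exact ⟨List.Pairwise.nil, fun b hb => absurd hb List.not_mem_nil⟩
  | cons x xs ih =>
    intro pre acc hes hacc
    unfold pvDD
    by_cases hx : acc.contains x = true
    · rw [if_pos hx]
      rw [List.contains_eq_mem, decide_eq_true_eq] at hx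
      have hmem : ∀ a, a ∈ acc ↔ a ∈ pre ++ [x] := by
        intro a
        rw [hacc a, List.mem_append, List.mem_singleton]
        constructor
        · exact Or.inl
        · rintro (h | h)
          · exact h
          · exact h ▸ (hacc x).mp hx
      obtain ⟨hp, hb⟩ := ih (pre ++ [x]) acc (by rw [hes, List.append_assoc]; rfl) hmem
      exact ⟨hp, fun b hbm => le_trans (by simp) (hb b hbm)⟩
    · rw [if_neg hx]
      rw [List.contains_eq_mem] at hx
      simp only [Bool.not_eq_true, decide_eq_false_iff_not] at hx
      have hxpre : x ∉ pre := fun h => hx ((hacc x).mpr h)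
      have hidx : es.idxOf x = pre.length := by
        rw [hes, List.idxOf_append, if_neg hxpre]
        simp
      have hmem : ∀ a, a ∈ acc ++ [x] ↔ a ∈ pre ++ [x] := by
        intro a
        rw [List.mem_append, List.mem_append, hacc a]
      obtain ⟨hp, hb⟩ := ih (pre ++ [x]) (acc ++ [x]) (by rw [hes, List.append_assoc]; rfl) hmem
      constructor
      · refine List.Pairwise.cons ?_ hp
        intro b hbm
        have := hb b hbm
        rw [List.length_append, List.length_singleton] at this
        omega
      · intro b hbm
        rcases List.mem_cons.mp hbm with h | h
        · rw [h, hidx]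
        · have := hb b h
          rw [List.length_append, List.length_singleton] at this
          omega

-- ===== stage 3: the rank dict maps w to its first index in the sorted entity list =====

theorem pv_rank_fold : ∀ (es : List String) (k : Int) (d : PySem.Dict String Int) (w : String),
    PySem.Dict.get? ((PySem.List.enumerate es k).foldl pvRankStep d) w =
      if PySem.Dict.get? d w = none then
        (if w.toList ≠ [] ∧ w ∈ es then some (k + (es.idxOf w : Int)) else none)
      else PySem.Dict.get? d w := by
  intro es
  induction es with
  | nil =>
    intro k d w
    by_cases h : PySem.Dict.get? d w = none <;>
      simp [PySem.List.enumerate, h]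
  | cons x xs ih =>
    intro k d w
    rw [PySem.List.enumerate_cons, List.foldl_cons, ih]
    by_cases hwx : w = x
    · subst hwx
      by_cases hd : PySem.Dict.get? d w = none
      · by_cases hx : w.toList = []
        · have hstep : pvRankStep d (k, w) = d := by
            unfold pvRankStep
            rw [if_neg (by simp [hx])]
          rw [hstep, if_pos hd, if_pos hd, if_neg (by simp [hx]), if_neg (by simp [hx])]
        · have hstep : pvRankStep d (k, w) = PySem.Dict.insert d w k := by
            unfold pvRankStep
            rw [if_pos ⟨hx, hd⟩]
          rw [hstep]
          have hins : PySem.Dict.get? (PySem.Dict.insert d w k) w = some k :=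
            PySem.Dict.get?_insert_self d w k
          rw [if_neg (by rw [hins]; exact fun h => by injection h), hins, if_pos hd,
            if_pos ⟨hx, List.mem_cons_self⟩, List.idxOf_cons_self]
          simp
      · have hstep : pvRankStep d (k, w) = d := by
          unfold pvRankStep
          rw [if_neg (by intro h; exact hd h.2)]
        rw [hstep, if_neg hd, if_neg hd]
    · have hstep : PySem.Dict.get? (pvRankStep d (k, x)) w = PySem.Dict.get? d w := by
        unfold pvRankStep
        split_ifs with h
        · exact PySem.Dict.get?_insert_of_ne d k hwx
        · rfl
      rw [hstep]
      by_cases hd : PySem.Dict.get? d w = none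
      · rw [if_pos hd, if_pos hd]
        have hmem : (w ∈ x :: xs) ↔ w ∈ xs := by
          rw [List.mem_cons]
          exact ⟨fun h => h.elim (fun h => absurd h hwx) id, Or.inr⟩
        by_cases hw : w.toList ≠ [] ∧ w ∈ xs
        · rw [if_pos hw, if_pos ⟨hw.1, hmem.mpr hw.2⟩]
          have hidx : (x :: xs).idxOf w = xs.idxOf w + 1 := by
            rw [List.idxOf_cons]
            have : (x == w) = false := by
              rw [beq_eq_false_iff_ne]
              exact fun h => hwx h.symm
            rw [this, cond_false]
          rw [hidx]
          push_cast
          ring_nf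
        · rw [if_neg hw, if_neg (by rw [hmem]; exact hw)]
      · rw [if_neg hd, if_neg hd]

theorem pv_rank_char (es : List String) (w : String) :
    PySem.Dict.get? (pvRank es) w =
      if w.toList ≠ [] ∧ w ∈ es then some ((es.idxOf w : Int)) else none := by
  unfold pvRank
  rw [pv_rank_fold es 0 PySem.Dict.empty w]
  have hempty : PySem.Dict.get? (PySem.Dict.empty : PySem.Dict String Int) w = none := rfl
  rw [if_pos hempty]
  by_cases h : w.toList ≠ [] ∧ w ∈ es
  · rw [if_pos h, if_pos h]
    norm_num
  · rw [if_neg h, if_neg h]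

theorem pv_keys_get? (d : PySem.Dict String Int) (w : String) :
    w ∈ PySem.Dict.keys d ↔ PySem.Dict.get? d w ≠ none := by
  unfold PySem.Dict.keys PySem.Dict.get?
  rw [List.mem_map]
  constructor
  · rintro ⟨p, hp, hfst⟩
    intro hnone
    rw [Option.map_eq_none_iff, List.find?_eq_none] at hnone
    exact absurd (by simp [hfst]) (hnone p hp)
  · intro h
    rcases hf : List.find? (fun p => p.1 == w) d.items with _ | p
    · rw [Option.map_eq_none_iff.mpr hf] at h
      exact absurd rfl h
    · have := List.find?_some hf
      rw [beq_iff_eq] at this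
      exact ⟨p, List.mem_of_find?_eq_some hf, this⟩

-- ===== stage 4: the window-scanned candidate list is a permutation of the canonical one =====

theorem pv_windows_eq (sch : List Char) (rank : PySem.Dict String Int) (L : Nat) :
    ∀ (l : List Nat) (cs : List (Int × Nat × Nat)),
      l.foldl (fun cs i =>
        match PySem.Dict.get? rank (String.ofList ((sch.drop i).take L)) with
        | some r => cs ++ [(r, i, i + L)]
        | none => cs) cs
      = cs ++ l.filterMap (fun i =>
          (PySem.Dict.get? rank (String.ofList ((sch.drop i).take L))).map (fun r => (r, i, i + L))) := by
  intro l
  induction l with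
  | nil => intro cs; simp
  | cons i l ih =>
    intro cs
    rw [List.foldl_cons, List.filterMap_cons]
    rcases hg : PySem.Dict.get? rank (String.ofList ((sch.drop i).take L)) with _ | r
    · simp only [Option.map_none]
      exact ih cs
    · simp only [Option.map_some]
      rw [ih (cs ++ [(r, i, i + L)]), List.append_assoc]
      rfl

def pvGen (sch : List Char) (rank : PySem.Dict String Int) (L : Nat) : List (Int × Nat × Nat) :=
  (List.range (sch.length + 1 - L)).filterMap (fun i =>
    (PySem.Dict.get? rank (String.ofList ((sch.drop i).take L))).map (fun r => (r, i, i + L)))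

theorem pv_cand_eq (sch : List Char) (rank : PySem.Dict String Int) (lengths : List Nat) :
    lengths.foldl (fun cs L => pvWindows sch rank L cs) []
      = lengths.flatMap (pvGen sch rank) := by
  have hfun : (fun (cs : List (Int × Nat × Nat)) (L : Nat) => pvWindows sch rank L cs)
      = (fun cs L => cs ++ pvGen sch rank L) := by
    funext cs L
    unfold pvWindows pvGen
    exact pv_windows_eq sch rank L _ cs
  rw [hfun, PySem.List.foldl_append_eq_flatMap]
  rfl

theorem pv_gen_mem (sch : List Char) (es : List String) (L : Nat) (c : Int × Nat × Nat) :
    c ∈ pvGen sch (pvRank es) L ↔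
      ∃ e, e ∈ es ∧ e.toList ≠ [] ∧ e.toList.length = L ∧ c.1 = (es.idxOf e : Int) ∧
        (c.2.1, c.2.2) ∈ pvBlock sch e := by
  unfold pvGen
  rw [List.mem_filterMap]
  constructor
  · rintro ⟨i, hi, hc⟩
    rw [Option.map_eq_some_iff] at hc
    obtain ⟨r, hr, hrc⟩ := hc
    rw [pv_rank_char] at hr
    split_ifs at hr with hcond
    · injection hr with hr
      subst hrc
      set w := String.ofList ((sch.drop i).take L) with hw
      have hwl : w.toList = (sch.drop i).take L := String.toList_ofList
      have hiL : i + L ≤ sch.length := by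
        have := List.mem_range.mp hi
        omega
      have hlen : w.toList.length = L := by
        rw [hwl, List.length_take, List.length_drop]
        omega
      have hL1 : 1 ≤ L := by
        rcases Nat.eq_zero_or_pos L with h0 | h0
        · exfalso
          apply hcond.1
        
          have : w.toList.length = 0 := by omega
          exact List.eq_nil_of_length_eq_zero this
        · exact h0
      refine ⟨w, hcond.2, hcond.1, hlen, by simp [← hr], ?_⟩
      rw [pv_blk_mem]
      refine ⟨hcond.1, by simp only; omega, ?_, by simp only [hlen]⟩
      simp only
      rw [hwl]
      exact List.take_prefix _ _
  · rintro ⟨e, hes, hne, hlen, hr, hblk⟩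
    obtain ⟨_, hi, hpre, ht⟩ := (pv_blk_mem sch e _).mp hblk
    simp only at hi hpre ht
    have hlenle := hpre.length_le
    rw [List.length_drop] at hlenle
    refine ⟨c.2.1, List.mem_range.mpr (by omega), ?_⟩
    have hwin : (sch.drop c.2.1).take L = e.toList := by
      rw [List.prefix_iff_eq_take] at hpre
      rw [← hlen, ← hpre]
    rw [hwin, String.ofList_toList, pv_rank_char, if_pos ⟨hne, hes⟩]
    rw [Option.map_some]
    have : c = (c.1, c.2.1, c.2.2) := rfl
    rw [this, hr, ht, hlen]

theorem pv_C_mem (sch : List Char) (es : List String) (c : Int × Nat × Nat) :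
    c ∈ pvC sch es ↔
      ∃ e, e ∈ es ∧ e.toList ≠ [] ∧ c.1 = (es.idxOf e : Int) ∧
        (c.2.1, c.2.2) ∈ pvBlock sch e := by
  unfold pvC
  rw [List.mem_flatMap]
  constructor
  · rintro ⟨e, he, hc⟩
    rw [List.mem_map] at hc
    obtain ⟨p, hp, hpc⟩ := hc
    refine ⟨e, (PySem.List.mem_dedup es e).mp he, ?_, by rw [← hpc], ?_⟩
    · exact ((pv_blk_mem sch e p).mp hp).1
    · rw [← hpc]
      exact hp
  · rintro ⟨e, hes, hne, hr, hblk⟩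
    refine ⟨e, (PySem.List.mem_dedup es e).mpr hes, ?_⟩
    rw [List.mem_map]
    exact ⟨(c.2.1, c.2.2), hblk, by rw [← hr]⟩

theorem pv_pairwise_flatMap {α β : Type} (R : β → β → Prop) (f : α → List β) :
    ∀ (l : List α), (∀ a ∈ l, (f a).Pairwise R) →
      l.Pairwise (fun a b => ∀ x ∈ f a, ∀ y ∈ f b, R x y) →
      (l.flatMap f).Pairwise R := by
  intro l
  induction l with
  | nil => intro _ _; simp
  | cons a l ih =>
    intro hin hcross
    rw [List.flatMap_cons, List.pairwise_append]
    rw [List.pairwise_cons] at hcross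
    refine ⟨hin a List.mem_cons_self, ih (fun b hb => hin b (List.mem_cons_of_mem _ hb)) hcross.2, ?_⟩
    intro x hx y hy
    rw [List.mem_flatMap] at hy
    obtain ⟨b, hb, hyb⟩ := hy
    exact hcross.1 b hb x hx y hyb

theorem pv_C_pairwise (sch : List Char) (es : List String) :
    (pvC sch es).Pairwise (fun a b => a.1 < b.1 ∨ (a.1 = b.1 ∧ a.2.1 < b.2.1)) := by
  unfold pvC
  apply pv_pairwise_flatMap
  · intro e _
    refine List.Pairwise.map _ ?_ (pv_blk_pairwise sch e)
    intro p q h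
    exact Or.inr ⟨rfl, h⟩
  · have hdd := (pv_dd_idx es es [] [] rfl (by simp)).1
    rw [← pv_dedup_dd] at hdd
    refine hdd.imp ?_
    intro e1 e2 h x hx y hy
    rw [List.mem_map] at hx hy
    obtain ⟨p, _, hp⟩ := hx
    obtain ⟨q, _, hq⟩ := hy
    rw [← hp, ← hq]
    refine Or.inl ?_
    show (es.idxOf e1 : Int) < (es.idxOf e2 : Int)
    exact_mod_cast h

theorem pv_C_nodup (sch : List Char) (es : List String) : (pvC sch es).Nodup := by
  refine (pv_C_pairwise sch es).imp ?_
  rintro a b (h | h) rfl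
  · omega
  · omega

theorem pv_cand_nodup (sch : List Char) (es : List String) (lengths : List Nat)
    (hl : lengths.Pairwise (· < ·)) :
    (lengths.flatMap (pvGen sch (pvRank es))).Nodup := by
  apply pv_pairwise_flatMap
  · intro L _
    unfold pvGen
    refine List.Pairwise.filterMap _ ?_ (List.pairwise_lt_range (n := sch.length + 1 - L))
    intro i j hij x hx y hy
    rw [Option.map_eq_some_iff] at hx hy
    obtain ⟨r1, _, hx⟩ := hx
    obtain ⟨r2, _, hy⟩ := hy
    intro hxy
    rw [← hx, ← hy] at hxy
    injection hxy with _ h2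
    injection h2 with h2
    omega
  · refine hl.imp ?_
    intro L1 L2 hL x hx y hy
    rw [pv_gen_mem] at hx hy
    obtain ⟨e1, _, _, hlen1, _, hb1⟩ := hx
    obtain ⟨e2, _, _, hlen2, _, hb2⟩ := hy
    obtain ⟨_, _, _, ht1⟩ := (pv_blk_mem _ _ _).mp hb1
    obtain ⟨_, _, _, ht2⟩ := (pv_blk_mem _ _ _).mp hb2
    intro hxy
    rw [hxy] at ht1
    omega

theorem pv_cand_perm_C (sch : List Char) (es : List String) (lengths : List Nat)
    (hl : lengths.Pairwise (· < ·))
    (hmem : ∀ L, L ∈ lengths ↔ ∃ e ∈ es, e.toList ≠ [] ∧ e.toList.length = L) :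
    (lengths.flatMap (pvGen sch (pvRank es))).Perm (pvC sch es) := by
  rw [List.perm_ext_iff_of_nodup (pv_cand_nodup sch es lengths hl) (pv_C_nodup sch es)]
  intro c
  rw [List.mem_flatMap, pv_C_mem]
  constructor
  · rintro ⟨L, _, hc⟩
    obtain ⟨e, h1, h2, _, h4, h5⟩ := (pv_gen_mem sch es L c).mp hc
    exact ⟨e, h1, h2, h4, h5⟩
  · rintro ⟨e, h1, h2, h3, h4⟩
    refine ⟨e.toList.length, (hmem _).mpr ⟨e, h1, h2, rfl⟩, ?_⟩
    rw [pv_gen_mem]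
    exact ⟨e, h1, h2, rfl, h3, h4⟩

-- ===== stage 5: candidates.sort() yields exactly the canonical priority-ordered list =====

def pvBl (a b : Int × Nat × Nat) : Bool :=
  decide (a.1 < b.1) || (!decide (b.1 < a.1) && decide (a.2.1 < b.2.1))

theorem pv_bl_trans (a b c : Int × Nat × Nat) (h1 : pvBl a b = true) (h2 : pvBl b c = true) :
    pvBl a c = true := by
  unfold pvBl at *
  simp only [Bool.or_eq_true, Bool.and_eq_true, Bool.not_eq_eq_eq_not, Bool.not_true,
    decide_eq_true_eq, decide_eq_false_iff_not] at *
  omega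

theorem pv_bl_asym (a b : Int × Nat × Nat) (h1 : pvBl a b = true) (h2 : pvBl b a = true) : False := by
  unfold pvBl at *
  simp only [Bool.or_eq_true, Bool.and_eq_true, Bool.not_eq_eq_eq_not, Bool.not_true,
    decide_eq_true_eq, decide_eq_false_iff_not] at *
  omega

theorem pv_bl_tot (a b : Int × Nat × Nat) (hne : ¬ (a.1 = b.1 ∧ a.2.1 = b.2.1)) :
    pvBl a b = true ∨ pvBl b a = true := by
  unfold pvBl
  simp only [Bool.or_eq_true, Bool.and_eq_true, Bool.not_eq_eq_eq_not, Bool.not_true,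
    decide_eq_true_eq, decide_eq_false_iff_not]
  by_cases h : a.1 = b.1
  · rcases Nat.lt_or_ge a.2.1 b.2.1 with h2 | h2
    · exact Or.inl (Or.inr ⟨by omega, h2⟩)
    · have h3 : b.2.1 < a.2.1 := by
        rcases Nat.eq_or_lt_of_le h2 with h4 | h4
        · exact absurd ⟨h, h4.symm⟩ hne
        · exact h4
      exact Or.inr (Or.inr ⟨by omega, h3⟩)
  · rcases Int.lt_or_lt_of_ne h with h2 | h2
    · exact Or.inl (Or.inl h2)
    · exact Or.inr (Or.inl h2)

theorem pv_insertBy_perm (bl : (Int × Nat × Nat) → (Int × Nat × Nat) → Bool) (x : Int × Nat × Nat) :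
    ∀ ys, (PySem.List.insertBy bl x ys).Perm (x :: ys) := by
  intro ys
  induction ys with
  | nil => simp [PySem.List.insertBy]
  | cons y ys ih =>
    unfold PySem.List.insertBy
    by_cases h : bl x y = true
    · rw [if_pos h]
    · rw [if_neg h]
      exact (List.Perm.cons y ih).trans (List.Perm.swap x y ys)

theorem pv_insertBy_pw (x : Int × Nat × Nat) :
    ∀ acc, acc.Pairwise (fun a b => pvBl a b = true) →
      (∀ y ∈ acc, ¬ (y.1 = x.1 ∧ y.2.1 = x.2.1)) →
      (PySem.List.insertBy pvBl x acc).Pairwise (fun a b => pvBl a b = true) := by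
  intro acc
  induction acc with
  | nil => intro _ _; simp [PySem.List.insertBy]
  | cons y ys ih =>
    intro hpw hkeys
    rw [List.pairwise_cons] at hpw
    unfold PySem.List.insertBy
    by_cases h : pvBl x y = true
    · rw [if_pos h]
      refine List.Pairwise.cons ?_ (List.Pairwise.cons hpw.1 hpw.2)
      intro z hz
      rcases List.mem_cons.mp hz with h' | h'
      · exact h' ▸ h
      · exact pv_bl_trans x y z h (hpw.1 z h')
    · rw [if_neg h]
      have hyx : pvBl y x = true := by
        rcases pv_bl_tot x y (fun hk => hkeys y List.mem_cons_self ⟨hk.1.symm, hk.2.symm⟩) with h' | h'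
        · exact absurd h' h
        · exact h'
      refine List.Pairwise.cons ?_ (ih hpw.2 (fun z hz => hkeys z (List.mem_cons_of_mem _ hz)))
      intro z hz
      rcases (PySem.List.mem_insertBy pvBl x z ys).mp hz with h' | h'
      · exact h' ▸ hyx
      · exact hpw.1 z h'

theorem pv_foldl_insertBy (U : List (Int × Nat × Nat))
    (hdist : ∀ a ∈ U, ∀ b ∈ U, a.1 = b.1 → a.2.1 = b.2.1 → a = b) :
    ∀ (xs acc : List (Int × Nat × Nat)), (∀ y ∈ acc ++ xs, y ∈ U) → (acc ++ xs).Nodup →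
      acc.Pairwise (fun a b => pvBl a b = true) →
      (xs.foldl (fun acc x => PySem.List.insertBy pvBl x acc) acc).Pairwise (fun a b => pvBl a b = true)
      ∧ (xs.foldl (fun acc x => PySem.List.insertBy pvBl x acc) acc).Perm (acc ++ xs) := by
  intro xs
  induction xs with
  | nil =>
    intro acc _ _ hpw
    exact ⟨hpw, by simp⟩
  | cons x xs ih =>
    intro acc hU hnd hpw
    rw [List.foldl_cons]
    have hperm1 : (PySem.List.insertBy pvBl x acc).Perm (x :: acc) := pv_insertBy_perm pvBl x acc
    have hndmid : (x :: (acc ++ xs)).Nodup := (List.perm_middle.symm.nodup_iff).mpr hnd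
    have hxacc : x ∉ acc := fun hx =>
      (List.nodup_cons.mp hndmid).1 (List.mem_append_left _ hx)
    have hpw' : (PySem.List.insertBy pvBl x acc).Pairwise (fun a b => pvBl a b = true) := by
      apply pv_insertBy_pw x acc hpw
      intro y hy hk
      have hyU : y ∈ U := hU y (List.mem_append_left _ hy)
      have hxU : x ∈ U := hU x (List.mem_append_right _ List.mem_cons_self)
      exact hxacc ((hdist y hyU x hxU hk.1 hk.2) ▸ hy)
    have hmem' : ∀ y ∈ PySem.List.insertBy pvBl x acc ++ xs, y ∈ U := by
      intro y hy
      rcases List.mem_append.mp hy with h | h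
      · rcases List.mem_cons.mp (hperm1.mem_iff.mp h) with h' | h'
        · exact hU y (h' ▸ List.mem_append_right _ List.mem_cons_self)
        · exact hU y (List.mem_append_left _ h')
      · exact hU y (List.mem_append_right _ (List.mem_cons_of_mem _ h))
    have hnd' : (PySem.List.insertBy pvBl x acc ++ xs).Nodup := by
      have : (PySem.List.insertBy pvBl x acc ++ xs).Perm (x :: acc ++ xs) :=
        hperm1.append_right xs
      rw [this.nodup_iff]
      rw [List.cons_append]
      exact hndmid
    obtain ⟨hp, hq⟩ := ih (PySem.List.insertBy pvBl x acc) hmem' hnd' hpw'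
    refine ⟨hp, ?_⟩
    exact hq.trans ((hperm1.append_right xs).trans List.perm_middle.symm)

theorem pv_perm_pairwise_eq {α : Type} (lt : α → α → Prop)
    (hasym : ∀ a b, lt a b → lt b a → False) :
    ∀ (l1 l2 : List α), l1.Perm l2 → l1.Pairwise lt → l2.Pairwise lt → l1 = l2 := by
  intro l1
  induction l1 with
  | nil =>
    intro l2 hp _ _
    exact hp.nil_eq
  | cons a t ih =>
    intro l2 hp h1 h2
    have ha : a ∈ l2 := hp.mem_iff.mp List.mem_cons_self
    match l2 with
    | [] => exact absurd ha List.not_mem_nil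
    | b :: t2 =>
      have hab : a = b := by
        by_contra hne
        have hb : b ∈ a :: t := hp.mem_iff.mpr List.mem_cons_self
        have ha2 : a ∈ t2 := by
          rcases List.mem_cons.mp ha with h | h
          · exact absurd h hne
          · exact h
        have hb1 : b ∈ t := by
          rcases List.mem_cons.mp hb with h | h
          · exact absurd h.symm hne
          · exact h
        exact hasym a b ((List.pairwise_cons.mp h1).1 b hb1) ((List.pairwise_cons.mp h2).1 a ha2)
      subst hab
      rw [ih t2 (List.Perm.cons_inv hp) (List.pairwise_cons.mp h1).2 (List.pairwise_cons.mp h2).2]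

theorem pv_C_key_inj (sch : List Char) (es : List String) :
    ∀ a ∈ pvC sch es, ∀ b ∈ pvC sch es, a.1 = b.1 → a.2.1 = b.2.1 → a = b := by
  intro a ha b hb h1 h2
  obtain ⟨e1, he1, hne1, hr1, hb1⟩ := (pv_C_mem sch es a).mp ha
  obtain ⟨e2, he2, hne2, hr2, hb2⟩ := (pv_C_mem sch es b).mp hb
  have hee : e1 = e2 := by
    have hidx : es.idxOf e1 = es.idxOf e2 := by
      rw [hr1, hr2] at h1
      exact_mod_cast h1
    have g1 : es[es.idxOf e1]'(List.idxOf_lt_length_of_mem he1) = e1 := List.getElem_idxOf _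
    have g2 : es[es.idxOf e2]'(List.idxOf_lt_length_of_mem he2) = e2 := List.getElem_idxOf _
    rw [← g1, ← g2]
    congr 1
  subst hee
  obtain ⟨_, _, _, ht1⟩ := (pv_blk_mem sch e1 _).mp hb1
  obtain ⟨_, _, _, ht2⟩ := (pv_blk_mem sch e1 _).mp hb2
  simp only at ht1 ht2
  have : a.2.2 = b.2.2 := by omega
  rcases a with ⟨ar, ai, at'⟩
  rcases b with ⟨br, bi, bt⟩
  simp only at h1 h2 this
  rw [h1, h2, this]

theorem pv_scand_eq (sch : List Char) (es : List String) (lengths : List Nat)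
    (hl : lengths.Pairwise (· < ·))
    (hmem : ∀ L, L ∈ lengths ↔ ∃ e ∈ es, e.toList ≠ [] ∧ e.toList.length = L) :
    PySem.List.sorted2 (lengths.flatMap (pvGen sch (pvRank es))) (fun c => c.1) (fun c => c.2.1) false
      = pvC sch es := by
  have hunf : PySem.List.sorted2 (lengths.flatMap (pvGen sch (pvRank es)))
      (fun c => c.1) (fun c => c.2.1) false
      = (lengths.flatMap (pvGen sch (pvRank es))).foldl
          (fun acc x => PySem.List.insertBy pvBl x acc) [] := rfl
  have hperm := pv_cand_perm_C sch es lengths hl hmem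
  have hdist : ∀ a ∈ pvC sch es, ∀ b ∈ pvC sch es, a.1 = b.1 → a.2.1 = b.2.1 → a = b :=
    pv_C_key_inj sch es
  obtain ⟨hp, hq⟩ := pv_foldl_insertBy (pvC sch es) hdist
    (lengths.flatMap (pvGen sch (pvRank es))) []
    (by intro y hy; rw [List.nil_append] at hy; exact hperm.mem_iff.mp hy)
    (by rw [List.nil_append]; exact pv_cand_nodup sch es lengths hl)
    List.Pairwise.nil
  rw [hunf]
  apply pv_perm_pairwise_eq (fun a b => pvBl a b = true) pv_bl_asym
  · exact hq.trans hperm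
  · exact hp
  · refine (pv_C_pairwise sch es).imp ?_
    rintro a b (h | h)
    · unfold pvBl
      simp only [Bool.or_eq_true, decide_eq_true_eq]
      exact Or.inl h
    · unfold pvBl
      simp only [Bool.or_eq_true, Bool.and_eq_true, Bool.not_eq_eq_eq_not, Bool.not_true,
        decide_eq_true_eq, decide_eq_false_iff_not]
      exact Or.inr ⟨by omega, h.2⟩

-- ===== stage 6: the binary-search selection sweep computes the reference greedy placement =====

def pvSB (st : List Nat × List Nat) : List (Nat × Nat) := st.1.zip st.2

def pvInv (st : List Nat × List Nat) (ch : List (Nat × Nat)) : Prop :=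
  st.1.length = st.2.length ∧
  (pvSB st).Perm ch ∧
  (pvSB st).Pairwise (fun p q => p.2 ≤ q.1) ∧
  (∀ p ∈ pvSB st, p.1 < p.2)

theorem pv_bisect_spec (starts : List Nat) (s : Nat)
    (hmono : ∀ j k, j ≤ k → k < starts.length → starts.getD j 0 ≤ starts.getD k 0) :
    ∀ (fuel lo hi : Nat), lo ≤ hi → hi ≤ starts.length → hi - lo ≤ fuel →
      (∀ j < lo, starts.getD j 0 ≤ s) →
      (∀ j, hi ≤ j → j < starts.length → s < starts.getD j 0) →
      pvBisect starts s fuel lo hi ≤ starts.length ∧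
      (∀ j < pvBisect starts s fuel lo hi, starts.getD j 0 ≤ s) ∧
      (∀ j, pvBisect starts s fuel lo hi ≤ j → j < starts.length → s < starts.getD j 0) := by
  intro fuel
  induction fuel with
  | zero =>
    intro lo hi h1 h2 h3 h4 h5
    have : lo = hi := by omega
    subst this
    exact ⟨by simpa [pvBisect] using h2, by simpa [pvBisect] using h4, by simpa [pvBisect] using h5⟩
  | succ fuel ih =>
    intro lo hi h1 h2 h3 h4 h5
    unfold pvBisect
    by_cases hlh : lo < hi
    · rw [if_pos hlh]
      by_cases hmid : starts.getD ((lo + hi) / 2) 0 ≤ s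
      · rw [if_pos hmid]
        apply ih ((lo + hi) / 2 + 1) hi (by omega) h2 (by omega) ?_ h5
        intro j hj
        exact le_trans (hmono j ((lo + hi) / 2) (by omega) (by omega)) hmid
      · rw [if_neg hmid]
        apply ih lo ((lo + hi) / 2) (by omega) (by omega) (by omega) h4 ?_
        intro j hj hjl
        exact lt_of_lt_of_le (by omega) (hmono ((lo + hi) / 2) j hj hjl)
    · rw [if_neg hlh]
      have : lo = hi := by omega
      subst this
      exact ⟨h2, h4, h5⟩

theorem pv_pairwise_insertIdx {α : Type} (R : α → α → Prop) :
    ∀ (l : List α) (k : Nat) (a : α), k ≤ l.length → l.Pairwise R →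
      (∀ j (_ : j < l.length), j < k → R l[j] a) →
      (∀ j (_ : j < l.length), k ≤ j → R a l[j]) →
      (l.insertIdx k a).Pairwise R := by
  intro l
  induction l with
  | nil =>
    intro k a hk _ _ _
    have : k = 0 := by simpa using hk
    subst this
    simp
  | cons x l ih =>
    intro k a hk hpw hlo hhi
    match k with
    | 0 =>
      rw [List.insertIdx_zero]
      refine List.Pairwise.cons ?_ hpw
      intro b hb
      obtain ⟨j, hj, hb⟩ := List.mem_iff_getElem.mp hb
      exact hb ▸ hhi j hj (Nat.zero_le _)
    | k + 1 =>
      rw [List.insertIdx_succ_cons]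
      rw [List.pairwise_cons] at hpw
      refine List.Pairwise.cons ?_ ?_
      · intro b hb
        rcases (List.mem_insertIdx (by simpa using hk)).mp hb with h | h
        · exact h ▸ hlo 0 (by simp) (by omega)
        · exact hpw.1 b h
      · refine ih k a (by simpa using hk) hpw.2 ?_ ?_
        · intro j hj hjk
          exact hlo (j + 1) (by simpa using hj) (by omega)
        · intro j hj hjk
          exact hhi (j + 1) (by simpa using hj) (by omega)

theorem pv_zip_insertIdx :
    ∀ (xs ys : List Nat) (k : Nat) (a b : Nat), xs.length = ys.length → k ≤ xs.length →
      (xs.insertIdx k a).zip (ys.insertIdx k b) = (xs.zip ys).insertIdx k (a, b) := by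
  intro xs
  induction xs with
  | nil =>
    intro ys k a b hlen hk
    have : k = 0 := by simpa using hk
    subst this
    match ys with
    | [] => simp
  | cons x xs ih =>
    intro ys k a b hlen hk
    match ys with
    | y :: ys =>
      match k with
      | 0 => simp [List.insertIdx_zero]
      | k + 1 =>
        rw [List.insertIdx_succ_cons, List.insertIdx_succ_cons]
        rw [List.zip_cons_cons, List.zip_cons_cons, List.insertIdx_succ_cons]
        rw [ih ys k a b (by simpa using hlen) (by simpa using hk)]

theorem pv_sb_getElem (st : List Nat × List Nat) (hlen : st.1.length = st.2.length)
    (j : Nat) (hj : j < (pvSB st).length) :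
    (pvSB st)[j] = (st.1.getD j 0, st.2.getD j 0) := by
  unfold pvSB at *
  have hj1 : j < st.1.length := by
    rw [List.length_zip] at hj
    omega
  have hj2 : j < st.2.length := by omega
  rw [List.getElem_zip, List.getD_eq_getElem _ _ hj1, List.getD_eq_getElem _ _ hj2]

theorem pv_sel_step (st : List Nat × List Nat) (ch : List (Nat × Nat)) (c : Int × Nat × Nat)
    (hInv : pvInv st ch) (hc : c.2.1 < c.2.2) :
    pvInv (pvSelect st c) (pvStep ch c.2) := by
  obtain ⟨hlen, hperm, hpw, hlt⟩ := hInv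
  have hsblen : (pvSB st).length = st.1.length := by
    unfold pvSB
    rw [List.length_zip]
    omega
  have hpwget := List.pairwise_iff_getElem.mp hpw
  have hmono : ∀ j k, j ≤ k → k < st.1.length → st.1.getD j 0 ≤ st.1.getD k 0 := by
    intro j k hjk hk
    rcases Nat.eq_or_lt_of_le hjk with h | h
    · rw [h]
    · have hR := hpwget j k (by omega) (by omega) h
      rw [pv_sb_getElem st hlen j (by omega), pv_sb_getElem st hlen k (by omega)] at hR
      have hl := hlt (pvSB st)[j] (List.getElem_mem _)
      rw [pv_sb_getElem st hlen j (by omega)] at hl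
      simp only at hR hl
      omega
  obtain ⟨hb1, hb2, hb3⟩ := pv_bisect_spec st.1 c.2.1 hmono (st.1.length + 1) 0 st.1.length
    (Nat.zero_le _) le_rfl (by omega) (by omega) (by omega)
  set lo := pvBisect st.1 c.2.1 (st.1.length + 1) 0 st.1.length with hlo
  -- the binary-searched neighbour test decides exactly "disjoint from every chosen interval"
  have hcond : ((lo = 0 ∨ st.2.getD (lo - 1) 0 ≤ c.2.1) ∧ (lo = st.1.length ∨ c.2.2 ≤ st.1.getD lo 0))
      ↔ (∀ ab ∈ pvSB st, c.2.2 ≤ ab.1 ∨ ab.2 ≤ c.2.1) := by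
    constructor
    · rintro ⟨hA, hB⟩ ab hab
      obtain ⟨j, hj, hab⟩ := List.mem_iff_getElem.mp hab
      rw [pv_sb_getElem st hlen j hj] at hab
      by_cases hjlo : j < lo
      · right
        rcases Nat.eq_or_lt_of_le (Nat.succ_le_of_lt hjlo) with h | h
        · rcases hA with h0 | hle
          · omega
          · rw [← hab]
            simp only
            have : j = lo - 1 := by omega
            rw [this]
            exact hle
        · -- j < lo - 1: interval j ends before interval (lo-1) starts, which is ≤ s
          have hR := hpwget j (lo - 1) (by omega) (by omega) (by omega)
          rw [pv_sb_getElem st hlen j (by omega), pv_sb_getElem st hlen (lo - 1) (by omega)] at hR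
          have hs := hb2 (lo - 1) (by omega)
          rw [← hab]
          simp only at hR ⊢
          omega
      · left
        rcases hB with h0 | hle
        · omega
        · have hmj := hmono lo j (by omega) (by omega)
          rw [← hab]
          simp only
          omega
    · intro hall
      constructor
      · by_cases h0 : lo = 0
        · exact Or.inl h0
        · right
          have hj : lo - 1 < (pvSB st).length := by omega
          have hd := hall _ (List.getElem_mem hj)
          rw [pv_sb_getElem st hlen (lo - 1) hj] at hd
          have hs := hb2 (lo - 1) (by omega)
          simp only at hd
          rcases hd with h | h
          · omega
          · exact h
      · by_cases h0 : lo = st.1.length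
        · exact Or.inl h0
        · right
          have hj : lo < (pvSB st).length := by omega
          have hd := hall _ (List.getElem_mem hj)
          rw [pv_sb_getElem st hlen lo hj] at hd
          have hlt' := hlt _ (List.getElem_mem hj)
          rw [pv_sb_getElem st hlen lo hj] at hlt'
          have hs := hb3 lo le_rfl (by omega)
          simp only at hd hlt' ⊢
          rcases hd with h | h
          · exact h
          · omega
  have hguard : (ch.all fun ab => decide (c.2.2 ≤ ab.1) || decide (ab.2 ≤ c.2.1)) = true
      ↔ (∀ ab ∈ pvSB st, c.2.2 ≤ ab.1 ∨ ab.2 ≤ c.2.1) := by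
    rw [List.all_eq_true]
    constructor
    · intro h ab hab
      have := h ab (hperm.mem_iff.mp hab)
      rw [Bool.or_eq_true, decide_eq_true_eq, decide_eq_true_eq] at this
      exact this
    · intro h ab hab
      rw [Bool.or_eq_true, decide_eq_true_eq, decide_eq_true_eq]
      exact h ab (hperm.mem_iff.mpr hab)
  unfold pvSelect pvStep
  rw [← hlo]
  by_cases hfree : ∀ ab ∈ pvSB st, c.2.2 ≤ ab.1 ∨ ab.2 ≤ c.2.1
  · rw [if_pos (hcond.mpr hfree), if_pos (hguard.mpr hfree)]
    have hlolen : lo ≤ st.1.length := hb1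
    have hzip : (st.1.insertIdx lo c.2.1).zip (st.2.insertIdx lo c.2.2)
        = (pvSB st).insertIdx lo (c.2.1, c.2.2) := pv_zip_insertIdx st.1 st.2 lo _ _ hlen hlolen
    refine ⟨?_, ?_, ?_, ?_⟩
    · simp only [List.length_insertIdx]
      rw [if_pos hlolen, if_pos (by omega)]
      omega
    · show ((st.1.insertIdx lo c.2.1).zip (st.2.insertIdx lo c.2.2)).Perm (ch ++ [c.2])
      rw [hzip]
      have h1 : ((pvSB st).insertIdx lo (c.2.1, c.2.2)).Perm ((c.2.1, c.2.2) :: pvSB st) :=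
        List.perm_insertIdx _ _ (by omega)
      have h2 : ((c.2.1, c.2.2) :: pvSB st).Perm ((c.2.1, c.2.2) :: ch) := hperm.cons _
      have h3 : (ch ++ [c.2]).Perm (c.2 :: ch) := List.perm_append_singleton _ _
      have hc2 : c.2 = (c.2.1, c.2.2) := rfl
      rw [hc2] at h3
      exact (h1.trans h2).trans h3.symm
    · show ((st.1.insertIdx lo c.2.1).zip (st.2.insertIdx lo c.2.2)).Pairwise (fun p q => p.2 ≤ q.1)
      rw [hzip]
      apply pv_pairwise_insertIdx _ _ _ _ (by omega) hpw
      · intro j hj hjlo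
        rw [pv_sb_getElem st hlen j hj]
        simp only
        -- ends[j] ≤ s for every j < lo
        rcases Nat.eq_or_lt_of_le (Nat.succ_le_of_lt hjlo) with h | h
        · have := (hcond.mpr hfree).1
          rcases this with h0 | hle
          · omega
          · have : j = lo - 1 := by omega
            rw [this]
            exact hle
        · have hR := hpwget j (lo - 1) (by omega) (by omega) (by omega)
          rw [pv_sb_getElem st hlen j (by omega), pv_sb_getElem st hlen (lo - 1) (by omega)] at hR
          have hs := hb2 (lo - 1) (by omega)
          have hl := hlt _ (List.getElem_mem (by omega : lo - 1 < (pvSB st).length))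
          rw [pv_sb_getElem st hlen (lo - 1) (by omega)] at hl
          simp only at hR hl
          omega
      · intro j hj hjlo
        rw [pv_sb_getElem st hlen j hj]
        simp only
        -- t ≤ starts[j] for every j ≥ lo
        rcases (hcond.mpr hfree).2 with h0 | hle
        · omega
        · exact le_trans hle (hmono lo j hjlo (by omega))
    · show ∀ p ∈ (st.1.insertIdx lo c.2.1).zip (st.2.insertIdx lo c.2.2), p.1 < p.2
      rw [hzip]
      intro p hp
      rcases ((List.mem_insertIdx (by omega)).mp hp) with h | h
      · rw [h]; exact hc
      · exact hlt p h
  · have hg : ¬ (ch.all fun ab => decide (c.2.2 ≤ ab.1) || decide (ab.2 ≤ c.2.1)) = true := by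
      intro h
      exact hfree (hguard.mp h)
    rw [if_neg (fun h => hfree (hcond.mp h)), if_neg hg]
    exact ⟨hlen, hperm, hpw, hlt⟩

theorem pv_sel_fold (cl : List (Int × Nat × Nat)) :
    ∀ (st : List Nat × List Nat) (ch : List (Nat × Nat)),
      pvInv st ch → (∀ c ∈ cl, c.2.1 < c.2.2) →
      pvInv (cl.foldl pvSelect st) (cl.foldl (fun ch c => pvStep ch c.2) ch) := by
  induction cl with
  | nil => intro st ch h _; exact h
  | cons c cl ih =>
    intro st ch h hlt
    rw [List.foldl_cons, List.foldl_cons]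
    exact ih _ _ (pv_sel_step st ch c h (hlt c List.mem_cons_self))
      (fun c' hc' => hlt c' (List.mem_cons_of_mem _ hc'))

theorem pv_replicate_render (n : Nat) :
    List.replicate n "O" = (List.range n).map (pvRenderIv []) := by
  have h : ∀ i : Nat, pvRenderIv [] i = "O" := fun i => rfl
  calc List.replicate n "O" = (List.range n).map (fun _ => "O") := by
        rw [List.map_const', List.length_range]
    _ = (List.range n).map (pvRenderIv []) := List.map_congr_left (fun i _ => (h i).symm)

-- ===== stage 7: painting the chosen intervals renders them; final assembly =====

theorem pv_paint_mark (lb : List String) (p : Nat × Nat) :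
    pvPaint lb p = pvMark lb p.1 (p.2 - p.1) := by
  unfold pvPaint pvMark
  have : p.2 - (p.1 + 1) = p.2 - p.1 - 1 := by omega
  rw [this]

theorem pv_paint_fold (n : Nat) :
    ∀ (sb pre : List (Nat × Nat)),
      (pre ++ sb).Pairwise (fun p q => p.2 ≤ q.1) →
      (∀ p ∈ pre ++ sb, p.1 < p.2 ∧ p.2 ≤ n) →
      sb.foldl pvPaint ((List.range n).map (pvRenderIv pre))
        = (List.range n).map (pvRenderIv (pre ++ sb)) := by
  intro sb
  induction sb with
  | nil =>
    intro pre _ _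
    rw [List.append_nil]
    rfl
  | cons p sb ih =>
    intro pre hpw hfacts
    rw [List.foldl_cons, pv_paint_mark]
    have hp := hfacts p (List.mem_append_right _ List.mem_cons_self)
    have hcross := (List.pairwise_append.mp hpw).2.2
    have hmark := pv_mark_eq pre ((List.range n).map (pvRenderIv pre)) n p.1 (p.2 - p.1)
      rfl (fun ab hab => (hfacts ab (List.mem_append_left _ hab)).1)
      (by omega) (by omega) ?_
    · rw [hmark]
      have hpe : (p.1, p.1 + (p.2 - p.1)) = p := by
        have h2 : p.1 + (p.2 - p.1) = p.2 := by omega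
        rw [h2]
      rw [hpe]
      have hass : pre ++ p :: sb = (pre ++ [p]) ++ sb := by
        rw [List.append_assoc]
        rfl
      rw [hass] at hpw hfacts
      rw [ih (pre ++ [p]) hpw hfacts, ← hass]
    · intro i hi1 hi2
      rintro ⟨ab, hab, h1, h2⟩
      have := hcross ab hab p List.mem_cons_self
      omega

theorem pv_render_perm (ch ch' : List (Nat × Nat)) (h : ch.Perm ch') (i : Nat) :
    pvRenderIv ch i = pvRenderIv ch' i := by
  unfold pvRenderIv
  rw [h.any_eq, h.any_eq]

theorem pv_main (sentence : String) (entity_list : List String) :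
    annotate_sentence sentence entity_list = annotate_sentence_alt sentence entity_list := by
  have hA := (pv_fold sentence.toList
      (PySem.List.sorted entity_list (fun e => PySem.Str.len e) true)
      (List.replicate sentence.toList.length "O") []
      (pv_replicate_render _) (fun ab hab => absurd hab List.not_mem_nil)).1
  set sch := sentence.toList with hsch
  set es := PySem.List.sorted entity_list (fun e => PySem.Str.len e) true with hes
  -- A's result is the render of the reference greedy placement over all candidate blocks
  have hR1 : (es.flatMap (pvBlock sch)).foldl pvStep []
      = ((PySem.List.dedup es).flatMap (pvBlock sch)).foldl pvStep [] := by
    rw [pv_dedup_dd]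
    exact pv_flatMap_dd sch es [] [] (fun e he => absurd he List.not_mem_nil)
  have hproj : (pvC sch es).map (fun c => c.2) = (PySem.List.dedup es).flatMap (pvBlock sch) := by
    unfold pvC
    rw [List.map_flatMap]
    congr 1
    funext e
    rw [List.map_map]
    have hcomp : ((fun c : Int × Nat × Nat => c.2) ∘ (fun p : Nat × Nat => ((es.idxOf e : Int), p.1, p.2)))
        = id := by
      funext p
      rfl
    rw [hcomp, List.map_id]
  have hR2 : (pvC sch es).foldl (fun ch c => pvStep ch c.2) []
      = ((PySem.List.dedup es).flatMap (pvBlock sch)).foldl pvStep [] := by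
    rw [← hproj, List.foldl_map]
  -- B's candidate list is the canonical one after sorting
  have hlpw : (PySem.List.sorted
      (PySem.Set.ofList ((PySem.Dict.keys (pvRank es)).map (fun e => e.toList.length)))
      (fun L => L) false).Pairwise (· < ·) :=
    PySem.List.sorted_ofList_pairwise_lt _
  have hLmem : ∀ L, L ∈ PySem.List.sorted
      (PySem.Set.ofList ((PySem.Dict.keys (pvRank es)).map (fun e => e.toList.length)))
      (fun L => L) false ↔ ∃ e ∈ es, e.toList ≠ [] ∧ e.toList.length = L := by
    intro L
    rw [PySem.List.mem_sorted, PySem.Set.mem_ofList, List.mem_map]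
    constructor
    · rintro ⟨e, hk, hlen⟩
      have hne := (pv_keys_get? (pvRank es) e).mp hk
      rw [pv_rank_char] at hne
      split_ifs at hne with hcond
      · exact ⟨e, hcond.2, hcond.1, hlen⟩
      · exact absurd rfl hne
    · rintro ⟨e, hes', hne, hlen⟩
      refine ⟨e, ?_, hlen⟩
      rw [pv_keys_get?, pv_rank_char, if_pos ⟨hne, hes'⟩]
      exact fun h => by injection h
  have hscand : PySem.List.sorted2
      ((PySem.List.sorted
        (PySem.Set.ofList ((PySem.Dict.keys (pvRank es)).map (fun e => e.toList.length)))
        (fun L => L) false).foldl (fun cs L => pvWindows sch (pvRank es) L cs) [])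
      (fun c => c.1) (fun c => c.2.1) false = pvC sch es := by
    rw [pv_cand_eq]
    exact pv_scand_eq sch es _ hlpw hLmem
  have hCfacts : ∀ c ∈ pvC sch es, c.2.1 < c.2.2 := by
    intro c hc
    obtain ⟨e, _, _, _, hblk⟩ := (pv_C_mem sch es c).mp hc
    exact pv_blk_lt sch e _ hblk
  have hInv0 : pvInv ([], []) [] := by
    refine ⟨rfl, ?_, ?_, ?_⟩
    · show (List.zip [] []).Perm ([] : List (Nat × Nat))
      simp
    · show (List.zip ([] : List Nat) ([] : List Nat)).Pairwise _
      simp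
    · intro p hp
      simp [pvSB] at hp
  have hsel := pv_sel_fold (pvC sch es) ([], []) [] hInv0 hCfacts
  obtain ⟨hslen, hsperm, hspw, hslt⟩ := hsel
  -- bound: every chosen interval ends within the sentence
  have hble : ∀ p ∈ pvSB ((pvC sch es).foldl pvSelect ([], [])), p.2 ≤ sch.length := by
    intro p hp
    have hpch := hsperm.mem_iff.mp hp
    rw [hR2] at hpch
    rcases pv_fold_mem _ _ _ hpch with h | h
    · exact absurd h List.not_mem_nil
    · rw [List.mem_flatMap] at h
      obtain ⟨e, _, hblk⟩ := h
      exact pv_blk_le sch e p hblk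
  have hpaint := pv_paint_fold sch.length (pvSB ((pvC sch es).foldl pvSelect ([], []))) []
    (by rw [List.nil_append]; exact hspw)
    (by
      rw [List.nil_append]
      intro p hp
      exact ⟨hslt p hp, hble p hp⟩)
  rw [List.nil_append] at hpaint
  -- assemble both sides
  show (sch.map (fun c => String.ofList [c])).zip _ = annotate_sentence_alt sentence entity_list
  rw [hA]
  simp only [annotate_sentence_alt]
  rw [← hsch, ← hes, hscand]
  congr 1
  have hz : pvSB ((pvC sch es).foldl pvSelect ([], []))
      = ((pvC sch es).foldl pvSelect ([], [])).1.zip ((pvC sch es).foldl pvSelect ([], [])).2 := rfl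
  rw [← hz, pv_replicate_render, hpaint]
  apply List.map_congr_left
  intro i _
  have hchain : (es.flatMap (fun e =>
      if e.toList = [] then []
      else (List.range sch.length).filterMap
        (fun i => if e.toList.isPrefixOf (sch.drop i) then some (i, i + e.toList.length) else none))).foldl pvStep []
      = (pvC sch es).foldl (fun ch c => pvStep ch c.2) [] := by
    rw [hR2, ← hR1]
    rfl
  rw [hchain]
  exact pv_render_perm _ _ hsperm.symm i

-- ===== VERDICT (by name: the statement is the Claim_ definition above) =====
theorem annotate_sentence_spec : Claim_equal_annotate_sentence := by
  intro sentence entity_list _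
  exact pv_main sentence entity_list
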